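-- pv_equiv track=rewrite | github.com/akimegr/fuel | gpt_script.py | translate_days
-- ===== SOURCE A (Python) =====
-- DAYS_TRANSLATION = {
--     "Mo": "Пн",
--     "Tu": "Вт",
--     "We": "Ср",
--     "Th": "Чт",
--     "Fr": "Пт",
--     "Sa": "Сб",
--     "Su": "Вс",
-- }
--
-- def translate_days(text):
--     if not text:
--         return "unknown"
--     if text.strip() == "24/7":
--         return "24/7"
--     for eng, ru in DAYS_TRANSLATION.items():
--         text = text.replace(eng, ru)
--     return text
-- ===== SOURCE B (Python) =====
-- DAYS_TRANSLATION = {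
--     "Mo": "Пн",
--     "Tu": "Вт",
--     "We": "Ср",
--     "Th": "Чт",
--     "Fr": "Пт",
--     "Sa": "Сб",
--     "Su": "Вс",
-- }
--
-- def translate_days(text):
--     if not text:
--         return "unknown"
--     if text.strip() == "24/7":
--         return "24/7"
--     parts = []
--     i = 0
--     while i < len(text):
--         two = text[i:i + 2]
--         if two in DAYS_TRANSLATION:
--             parts.append(DAYS_TRANSLATION[two])
--             i += 2
--         else:
--             parts.append(text[i])
--             i += 1
--     return "".join(parts)
-- ===== Notes on version B (the rewrite author's own statement) =====
-- stated objective: alternative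
-- what changed: B replaces A's seven sequential whole-string str.replace passes by a single left-to-right scan that looks up each two-character window in the day dictionary once, building the output in one pass.
import Mathlib
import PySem

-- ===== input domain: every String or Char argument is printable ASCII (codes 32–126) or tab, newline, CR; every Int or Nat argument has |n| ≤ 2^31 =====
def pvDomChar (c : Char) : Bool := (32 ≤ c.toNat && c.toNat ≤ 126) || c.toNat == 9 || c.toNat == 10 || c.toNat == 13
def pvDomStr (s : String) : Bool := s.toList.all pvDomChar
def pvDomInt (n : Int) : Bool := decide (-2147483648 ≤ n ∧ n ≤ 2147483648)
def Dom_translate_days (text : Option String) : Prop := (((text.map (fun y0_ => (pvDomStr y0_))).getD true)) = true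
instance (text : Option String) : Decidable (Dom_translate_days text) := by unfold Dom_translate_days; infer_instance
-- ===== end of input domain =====

-- B replaces A's seven sequential str.replace passes by one left-to-right scan that looks
-- each two-character window up in the table once (objective: alternative single-pass algorithm).

-- ===== PORT A =====
def DAYS_TRANSLATION : PySem.Dict String String :=
  PySem.Dict.mk [("Mo", "Пн"), ("Tu", "Вт"), ("We", "Ср"), ("Th", "Чт"),
                 ("Fr", "Пт"), ("Sa", "Сб"), ("Su", "Вс")]

def translate_days (text : Option String) : String :=
  match text with
  | none => "unknown"                                  -- `if not text` (None)
  | some t =>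
    if t = "" then "unknown"                           -- `if not text` (empty string)
    else if PySem.Str.strip t = "24/7" then "24/7"
    else
      -- for eng, ru in DAYS_TRANSLATION.items(): text = text.replace(eng, ru)
      DAYS_TRANSLATION.items.foldl (fun acc p => PySem.Str.replace acc p.1 p.2) t

-- ===== PORT B =====
-- the dict of Source B, with the two-character keys as character pairs
def dayPairs : List ((Char × Char) × List Char) :=
  [(('M', 'o'), ['П', 'н']), (('T', 'u'), ['В', 'т']), (('W', 'e'), ['С', 'р']),
   (('T', 'h'), ['Ч', 'т']), (('F', 'r'), ['П', 'т']), (('S', 'a'), ['С', 'б']),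
   (('S', 'u'), ['В', 'с'])]

-- the `while i < len(text)` loop of Source B: one pass, dict lookup on the 2-char window
def scanTr (ks : List ((Char × Char) × List Char)) : List Char → List Char
  | [] => []
  | [c] => [c]
  | a :: b :: t =>
    match ks.findSome? (fun kr => if kr.1.1 = a ∧ kr.1.2 = b then some kr.2 else none) with
    | some r => r ++ scanTr ks t
    | none => a :: scanTr ks (b :: t)
termination_by l => l.length

def translate_days_alt (text : Option String) : String :=
  match text with
  | none => "unknown"
  | some t =>
    if t = "" then "unknown"
    else if PySem.Str.strip t = "24/7" then "24/7"
    else String.ofList (scanTr dayPairs t.toList)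

-- ===== PRECONDITION & SPEC =====
def Spec_translate_days (text : Option String) (out : String) : Prop := out = translate_days_alt text
instance (text : Option String) (out : String) : Decidable (Spec_translate_days text out) := by unfold Spec_translate_days; infer_instance

-- ===== CLAIM (what is proved, stated in full; the proofs are below) =====
def Claim_equal_translate_days : Prop := ∀ (text : Option String), Dom_translate_days text → Spec_translate_days text (translate_days text)

-- ===== LEMMAS AND PROOFS =====

-- reference form of one Python str.replace pass with a 2-character pattern
def rep2 (k0 k1 : Char) (r : List Char) : List Char → List Char
  | [] => []
  | [c] => [c]
  | a :: b :: t => if a = k0 ∧ b = k1 then r ++ rep2 k0 k1 r t else a :: rep2 k0 k1 r (b :: t)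
termination_by l => l.length

theorem rep2_nil (k0 k1 : Char) (r : List Char) : rep2 k0 k1 r [] = [] := by simp [rep2]

theorem rep2_single (k0 k1 c : Char) (r : List Char) : rep2 k0 k1 r [c] = [c] := by simp [rep2]

theorem rep2_cons_of_ne (k0 k1 c : Char) (r X : List Char) (h : c ≠ k0) :
    rep2 k0 k1 r (c :: X) = c :: rep2 k0 k1 r X := by
  match X with
  | [] => simp [rep2]
  | b :: t => simp [rep2, h]

theorem rep2_append_pass (k0 k1 : Char) (r r' Z : List Char) (h : ∀ c ∈ r', c ≠ k0) :
    rep2 k0 k1 r (r' ++ Z) = r' ++ rep2 k0 k1 r Z := by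
  induction r' with
  | nil => simp
  | cons c cs ih =>
    have hc : c ≠ k0 := h c (List.mem_cons_self ..)
    simp only [List.cons_append, rep2_cons_of_ne k0 k1 c r _ hc,
      ih (fun d hd => h d (List.mem_cons_of_mem _ hd))]

theorem rep2_head (k0 k1 h : Char) (r X : List Char) (hr : r ≠ []) :
    (rep2 k0 k1 r (h :: X)).head? = some h ∨ (rep2 k0 k1 r (h :: X)).head? = r.head? := by
  match X with
  | [] => left; simp [rep2]
  | b :: t =>
    by_cases hm : h = k0 ∧ b = k1
    · right; simp [rep2, hm, List.head?_append_of_ne_nil _ hr]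
    · left; simp [rep2, hm]

theorem go_spec (k0 k1 : Char) (r : List Char) :
    ∀ (fuel : Nat) (l acc : List Char), l.length ≤ fuel →
    PySem.Chars.replace.go [k0, k1] r fuel l acc = acc.reverse ++ rep2 k0 k1 r l := by
  intro fuel
  induction fuel with
  | zero =>
    intro l acc h
    have : l = [] := List.eq_nil_of_length_eq_zero (Nat.le_zero.mp h)
    subst this
    simp [PySem.Chars.replace.go, rep2]
  | succ n ih =>
    intro l acc h
    match l with
    | [] => simp [PySem.Chars.replace.go, rep2]
    | [c] =>
      have hp : [k0, k1].isPrefixOf [c] = false := by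
        simp [List.isPrefixOf]
      simp [PySem.Chars.replace.go, hp, ih [] (c :: acc) (by simp), rep2]
    | a :: b :: t =>
      have hlt : t.length ≤ n := by simp at h; omega
      have hlb : (b :: t).length ≤ n := by simp at h ⊢; omega
      by_cases hm : a = k0 ∧ b = k1
      · have hp : [k0, k1].isPrefixOf (a :: b :: t) = true := by
          simp [List.isPrefixOf, hm.1, hm.2]
        simp [PySem.Chars.replace.go, ih t (r.reverse ++ acc) hlt, rep2, hm]
      · have hp : [k0, k1].isPrefixOf (a :: b :: t) = false := by
          simp [List.isPrefixOf]; intro h1 h2; exact hm ⟨h1.symm, h2.symm⟩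
        simp [PySem.Chars.replace.go, hp, ih (b :: t) (a :: acc) hlb, rep2, hm]

theorem replace_eq_rep2 (k0 k1 : Char) (r l : List Char) :
    PySem.Chars.replace l [k0, k1] r = rep2 k0 k1 r l := by
  unfold PySem.Chars.replace
  simpa using go_spec k0 k1 r l.length l [] le_rfl

-- the seven-pass loop, as a fold of rep2 over the table
def chainTr (ks : List ((Char × Char) × List Char)) (l : List Char) : List Char :=
  ks.foldl (fun X kr => rep2 kr.1.1 kr.1.2 kr.2 X) l

theorem chain_nil (ks : List ((Char × Char) × List Char)) : chainTr ks [] = [] := by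
  induction ks with
  | nil => rfl
  | cons k ks ih => simpa [chainTr, rep2_nil] using ih

theorem chain_single (ks : List ((Char × Char) × List Char)) (c : Char) :
    chainTr ks [c] = [c] := by
  induction ks with
  | nil => rfl
  | cons k ks ih => simpa [chainTr, rep2_single] using ih

theorem chain_append_pass (ks : List ((Char × Char) × List Char)) (r' : List Char)
    (h : ∀ kr ∈ ks, ∀ c ∈ r', c ≠ kr.1.1) :
    ∀ Z, chainTr ks (r' ++ Z) = r' ++ chainTr ks Z := by
  induction ks with
  | nil => intro Z; rfl
  | cons k ks ih =>
    intro Z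
    have h1 : ∀ c ∈ r', c ≠ k.1.1 := fun c hc => h k (List.mem_cons_self ..) c hc
    simp only [chainTr, List.foldl_cons]
    rw [rep2_append_pass _ _ _ _ _ h1]
    exact ih (fun kr hkr c hc => h kr (List.mem_cons_of_mem _ hkr) c hc) _

theorem chain_cons2_pass (ks : List ((Char × Char) × List Char)) (a b : Char)
    (hab : ∀ kr ∈ ks, ¬(a = kr.1.1 ∧ b = kr.1.2)) (hb : ∀ kr ∈ ks, b ≠ kr.1.1) :
    ∀ X, chainTr ks (a :: b :: X) = a :: b :: chainTr ks X := by
  induction ks with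
  | nil => intro X; rfl
  | cons k ks ih =>
    intro X
    have h1 : ¬(a = k.1.1 ∧ b = k.1.2) := hab k (List.mem_cons_self ..)
    have h2 : b ≠ k.1.1 := hb k (List.mem_cons_self ..)
    simp only [chainTr, List.foldl_cons]
    rw [show rep2 k.1.1 k.1.2 k.2 (a :: b :: X) = a :: b :: rep2 k.1.1 k.1.2 k.2 X by
      simp [rep2, h1]; exact rep2_cons_of_ne _ _ _ _ _ h2]
    exact ih (fun kr hkr => hab kr (List.mem_cons_of_mem _ hkr))
      (fun kr hkr => hb kr (List.mem_cons_of_mem _ hkr)) _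

theorem chain_cons_safe (ks0 : List ((Char × Char) × List Char))
    (H1 : ∀ kr ∈ ks0, kr.2 ≠ [])
    (HR : ∀ kr ∈ ks0, ∀ c ∈ kr.2, ∀ kr' ∈ ks0, c ≠ kr'.1.2)
    (a : Char) :
    ∀ (ks : List ((Char × Char) × List Char)), (∀ kr ∈ ks, kr ∈ ks0) →
    ∀ (Y : List Char), (∀ h, Y.head? = some h → ∀ kr ∈ ks0, ¬(a = kr.1.1 ∧ h = kr.1.2)) →
    chainTr ks (a :: Y) = a :: chainTr ks Y := by
  intro ks
  induction ks with
  | nil => intro _ Y _; rfl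
  | cons k ks ih =>
    intro hsub Y hY
    have hk0 : k ∈ ks0 := hsub k (List.mem_cons_self ..)
    simp only [chainTr, List.foldl_cons]
    match Y with
    | [] =>
      rw [rep2_single, rep2_nil]
      show chainTr ks [a] = a :: chainTr ks []
      rw [chain_single, chain_nil]
    | h :: Y' =>
      have hnm : ¬(a = k.1.1 ∧ h = k.1.2) := hY h rfl k hk0
      rw [show rep2 k.1.1 k.1.2 k.2 (a :: h :: Y') = a :: rep2 k.1.1 k.1.2 k.2 (h :: Y') by
        simp [rep2, hnm]]
      refine ih (fun kr hkr => hsub kr (List.mem_cons_of_mem _ hkr)) _ ?_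
      intro h2 hh2 kr hkr
      rcases rep2_head k.1.1 k.1.2 h k.2 Y' (H1 k hk0) with he | he
      · rw [he] at hh2
        injection hh2 with hEq
        subst hEq
        exact hY _ rfl kr hkr
      · rw [he] at hh2
        have hm : h2 ∈ k.2 := List.mem_of_mem_head? hh2
        rintro ⟨-, hc⟩
        exact HR k hk0 h2 hm kr hkr hc

theorem findSome?_split {α β : Type} (f : α → Option β) :
    ∀ (l : List α) (b : β), l.findSome? f = some b →
    ∃ l1 x l2, l = l1 ++ x :: l2 ∧ f x = some b ∧ ∀ y ∈ l1, f y = none := by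
  intro l
  induction l with
  | nil => intro b h; simp [List.findSome?] at h
  | cons x xs ih =>
    intro b h
    cases hf : f x with
    | some v =>
      simp only [List.findSome?_cons, hf] at h
      exact ⟨[], x, xs, by simp, by rw [hf]; exact h, by simp⟩
    | none =>
      simp only [List.findSome?_cons, hf] at h
      obtain ⟨l1, y, l2, rfl, hy, hnone⟩ := ih b h
      exact ⟨x :: l1, y, l2, by simp, hy, by
        intro z hz
        rcases List.mem_cons.mp hz with rfl | hz
        · exact hf
        · exact hnone z hz⟩

theorem chain_eq_scan (ks0 : List ((Char × Char) × List Char))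
    (H1 : ∀ kr ∈ ks0, kr.2 ≠ [])
    (H2 : ∀ kr ∈ ks0, ∀ kr' ∈ ks0, kr.1.2 ≠ kr'.1.1)
    (HR : ∀ kr ∈ ks0, ∀ c ∈ kr.2, ∀ kr' ∈ ks0, c ≠ kr'.1.1 ∧ c ≠ kr'.1.2) :
    ∀ (n : Nat) (l : List Char), l.length ≤ n → chainTr ks0 l = scanTr ks0 l := by
  intro n
  induction n with
  | zero =>
    intro l h
    have : l = [] := List.eq_nil_of_length_eq_zero (Nat.le_zero.mp h)
    subst this; rw [chain_nil]; simp [scanTr]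
  | succ n ih =>
    intro l h
    match l with
    | [] => rw [chain_nil]; simp [scanTr]
    | [c] => rw [chain_single]; simp [scanTr]
    | a :: b :: t =>
      have hlt : t.length ≤ n := by simp at h; omega
      have hlb : (b :: t).length ≤ n := by simp at h ⊢; omega
      cases hls : ks0.findSome? (fun kr => if kr.1.1 = a ∧ kr.1.2 = b then some kr.2 else none) with
      | some r =>
        obtain ⟨ks1, e, ks2, hsplit, he, hnone⟩ := findSome?_split _ ks0 r hls
        have hea : e.1.1 = a ∧ e.1.2 = b ∧ e.2 = r := by
          by_cases hc : e.1.1 = a ∧ e.1.2 = b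
          · simp [hc] at he; exact ⟨hc.1, hc.2, he⟩
          · simp [hc] at he
        have hmem1 : ∀ kr ∈ ks1, kr ∈ ks0 := fun kr hkr => hsplit ▸ List.mem_append_left _ hkr
        have hmem2 : ∀ kr ∈ ks2, kr ∈ ks0 := fun kr hkr =>
          hsplit ▸ List.mem_append_right _ (List.mem_cons_of_mem _ hkr)
        have hemem : e ∈ ks0 := hsplit ▸ List.mem_append_right _ (List.mem_cons_self ..)
        -- pass a::b through ks1 (no earlier entry matches, and b is never a first char)
        have step1 : chainTr ks1 (a :: b :: t) = a :: b :: chainTr ks1 t :=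
          chain_cons2_pass ks1 a b
            (fun kr hkr hc => by
              have := hnone kr hkr; simp [← hc.1, ← hc.2] at this)
            (fun kr hkr => by
              have := H2 e hemem kr (hmem1 kr hkr); rw [hea.2.1] at this; exact this) _
        have hchain : chainTr ks0 (a :: b :: t) = r ++ chainTr ks0 t := by
          rw [hsplit]
          have hfold : ∀ m, chainTr (ks1 ++ e :: ks2) m = chainTr ks2 (rep2 e.1.1 e.1.2 e.2 (chainTr ks1 m)) := by
            intro m; simp [chainTr, List.foldl_append]
          rw [hfold, hfold, step1]
          rw [show rep2 e.1.1 e.1.2 e.2 (a :: b :: chainTr ks1 t)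
                = r ++ rep2 e.1.1 e.1.2 e.2 (chainTr ks1 t) by
            simp [rep2, hea.1, hea.2.1, hea.2.2]]
          exact chain_append_pass ks2 r
            (fun kr hkr c hc => (HR e hemem c (hea.2.2 ▸ hc) kr (hmem2 kr hkr)).1) _
        rw [hchain, ih t hlt]
        show _ = scanTr ks0 (a :: b :: t)
        rw [scanTr, hls]
      | none =>
        have hnm : ∀ kr ∈ ks0, ¬(kr.1.1 = a ∧ kr.1.2 = b) := by
          intro kr hkr hc
          have := List.findSome?_eq_none_iff.mp hls kr hkr
          simp [hc.1, hc.2] at this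
        have hchain : chainTr ks0 (a :: b :: t) = a :: chainTr ks0 (b :: t) := by
          refine chain_cons_safe ks0 H1
            (fun kr hkr c hc kr' hkr' => (HR kr hkr c hc kr' hkr').2) a ks0 (fun kr h => h)
            (b :: t) ?_
          intro h hh kr hkr
          obtain rfl := Option.some.inj hh
          intro hc
          exact hnm kr hkr ⟨hc.1.symm, hc.2.symm⟩
        rw [hchain, ih (b :: t) hlb]
        show _ = scanTr ks0 (a :: b :: t)
        rw [scanTr, hls]

-- concrete hypotheses hold for the day table
set_option maxRecDepth 8000 in
theorem chain_eq_scan_days (l : List Char) : chainTr dayPairs l = scanTr dayPairs l := by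
  refine chain_eq_scan dayPairs ?_ ?_ ?_ l.length l le_rfl
  · simp [dayPairs]
  · simp [dayPairs]
  · simp [dayPairs]

theorem strrep (X o n : String) (k0 k1 : Char) (r : List Char)
    (ho : o.toList = [k0, k1]) (hn : n.toList = r) :
    PySem.Str.replace X o n = String.ofList (rep2 k0 k1 r X.toList) := by
  rw [PySem.Str.replace, ho, hn, replace_eq_rep2]

theorem translate_days_some_eq (s : String) (h0 : ¬ s = "") (h1 : ¬ PySem.Str.strip s = "24/7") :
    translate_days (some s) = String.ofList (chainTr dayPairs s.toList) := by
  simp only [translate_days, DAYS_TRANSLATION, if_neg h0, if_neg h1, List.foldl_cons,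
    List.foldl_nil]
  rw [strrep _ "Mo" "Пн" 'M' 'o' ['П','н'] rfl rfl,
      strrep _ "Tu" "Вт" 'T' 'u' ['В','т'] rfl rfl, String.toList_ofList,
      strrep _ "We" "Ср" 'W' 'e' ['С','р'] rfl rfl, String.toList_ofList,
      strrep _ "Th" "Чт" 'T' 'h' ['Ч','т'] rfl rfl, String.toList_ofList,
      strrep _ "Fr" "Пт" 'F' 'r' ['П','т'] rfl rfl, String.toList_ofList,
      strrep _ "Sa" "Сб" 'S' 'a' ['С','б'] rfl rfl, String.toList_ofList,
      strrep _ "Su" "Вс" 'S' 'u' ['В','с'] rfl rfl, String.toList_ofList]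
  rfl

-- ===== VERDICT (by name: the statement is the Claim_ definition above) =====
theorem translate_days_spec : Claim_equal_translate_days := by
  intro text _
  unfold Spec_translate_days
  match text with
  | none => rfl
  | some s =>
    by_cases h0 : s = ""
    · simp [translate_days, translate_days_alt, h0]
    · by_cases h1 : PySem.Str.strip s = "24/7"
      · simp [translate_days, translate_days_alt, h0, h1]
      · rw [translate_days_some_eq s h0 h1, chain_eq_scan_days]
        simp [translate_days_alt, h0, h1]
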